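-- pv_equiv track=rewrite | github.com/dmitryro/facebook | greedy/seating_arrangements.py | minOverallAwkwardness
-- ===== SOURCE A (Python) =====
-- def minOverallAwkwardness(arr):
--   # Write your code here
--   max_dist = 0
--   arr.sort()
--   for i in range(len(arr)):
--     if i == 0:
--         right = left = arr[0]
--         continue
--     if i % 2 == 0:
--       max_dist = max(max_dist, arr[i] - right)
--       right = arr[i]
--     else:
--       max_dist = max(max_dist, arr[i] - left)
--       left = arr[i]
--   return max_dist
-- ===== SOURCE B (Python) =====
-- def minOverallAwkwardness(arr):
--   # Build the optimal zig-zag circular seating explicitly (evens of the sorted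
--   # order going one way round the circle, odds coming back) and measure its
--   # maximum adjacent absolute difference around the circle.
--   arr.sort()
--   seating = arr[::2] + arr[1::2][::-1]
--   rot = seating[1:] + seating[:1]
--   return max([abs(b - a) for a, b in zip(seating, rot)], default=0)
-- ===== Notes on version B (the rewrite author's own statement) =====
-- stated objective: alternative
-- what changed: Instead of A's indexed scan with a parity branch and left/right trackers, B explicitly constructs the zig-zag circular seating (even-indexed sorted values forward, odd-indexed backward) and returns the maximum adjacent absolute difference around that circle.
import Mathlib
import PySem

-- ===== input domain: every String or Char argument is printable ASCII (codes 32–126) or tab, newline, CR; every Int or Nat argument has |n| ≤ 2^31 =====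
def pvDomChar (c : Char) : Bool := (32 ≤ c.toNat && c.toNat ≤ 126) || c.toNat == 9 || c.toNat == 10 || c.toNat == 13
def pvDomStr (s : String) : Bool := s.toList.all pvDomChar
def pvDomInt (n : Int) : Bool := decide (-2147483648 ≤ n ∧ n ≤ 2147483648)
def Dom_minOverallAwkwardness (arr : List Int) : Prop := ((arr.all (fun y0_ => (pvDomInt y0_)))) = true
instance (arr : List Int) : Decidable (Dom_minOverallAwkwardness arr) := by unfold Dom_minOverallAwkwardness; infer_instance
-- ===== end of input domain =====

-- B builds the optimal zig-zag circular seating itself (even-indexed sorted values one way round,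
-- odd-indexed coming back) and returns the seating's maximum adjacent absolute difference around
-- the circle, instead of A's indexed scan with a parity branch (objective: alternative).
-- Both A and B sort the caller's list in place in Python; the equivalence proved is about the return value.

-- ===== PORT A =====
-- loop body of A: state = (max_dist, left, right); Python's left/right are unassigned before the
-- i = 0 iteration, which always runs first, so the dummy 0s in the initial state are never read
def pvStepA (s : List Int) (st : Int × Int × Int) (i : Int) : Int × Int × Int :=
  if i == 0 then (st.1, PySem.List.pyGetD s 0 0, PySem.List.pyGetD s 0 0)
  else if PySem.Int.mod i 2 == 0 then
    (max st.1 (PySem.List.pyGetD s i 0 - st.2.2), st.2.1, PySem.List.pyGetD s i 0)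
  else
    (max st.1 (PySem.List.pyGetD s i 0 - st.2.1), PySem.List.pyGetD s i 0, st.2.2)

def minOverallAwkwardness (arr : List Int) : Int :=
  let s := PySem.List.sorted arr (fun x => x) false
  ((PySem.List.pyRange 0 (s.length : Int) 1).foldl (pvStepA s) (0, 0, 0)).1

-- ===== PORT B =====
-- arr[::2] and arr[1::2] are the step-2 slices; the step literal is nonzero so slice? is never
-- none and '.getD []' is exact; [::-1] is ported as List.reverse (PySem.List.slice?_none_none_neg_one);
-- max(gaps, default=0) is PySem.List.maxD
def minOverallAwkwardness_alt (arr : List Int) : Int :=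
  let s := PySem.List.sorted arr (fun x => x) false
  let seating := (PySem.List.slice? s none none 2).getD [] ++
                 ((PySem.List.slice? s (some 1) none 2).getD []).reverse
  let rot := PySem.List.slice seating (some 1) none ++ PySem.List.slice seating none (some 1)
  PySem.List.maxD ((seating.zip rot).map (fun p => |p.2 - p.1|)) (fun x => x) 0

-- ===== PRECONDITION & SPEC =====
def Spec_minOverallAwkwardness (arr : List Int) (out : Int) : Prop := out = minOverallAwkwardness_alt arr
instance (arr : List Int) (out : Int) : Decidable (Spec_minOverallAwkwardness arr out) := by unfold Spec_minOverallAwkwardness; infer_instance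

-- ===== CLAIM (what is proved, stated in full; the proofs are below) =====
def Claim_equal_minOverallAwkwardness : Prop := ∀ (arr : List Int), Dom_minOverallAwkwardness arr → Spec_minOverallAwkwardness arr (minOverallAwkwardness arr)

-- ===== LEMMAS AND PROOFS =====

-- a sorted list is monotone at its (defaulted) positions
lemma getD_mono (s : List Int) (hs : s.Pairwise (· ≤ ·)) (p q : Nat) (hpq : p ≤ q)
    (hq : q < s.length) : s.getD p 0 ≤ s.getD q 0 := by
  rw [List.getD_eq_getElem s 0 (by omega), List.getD_eq_getElem s 0 hq]
  rcases Nat.eq_or_lt_of_le hpq with h | h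
  · subst h; rfl
  · exact List.pairwise_iff_getElem.mp hs p q (by omega) hq h

-- A's stride-2 gap at index i, and the running-max step over it (proof-side description of A)
def pvStepB (s : List Int) (ans : Int) (i : Int) : Int :=
  max ans (PySem.List.pyGetD s i 0 - PySem.List.pyGetD s (i - 2) 0)

-- invariant: after A has processed indices 1..j, its max equals the running max of the
-- stride-2 gaps over indices 2..j seeded with s[1]-s[0], its left is the element at the
-- last odd index <= j, its right the one at the last even index <= j
lemma pvInv (s : List Int) (hs : s.Pairwise (· ≤ ·)) (j : Nat) (h1 : 1 ≤ j) (hj : j < s.length) :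
    (PySem.List.pyRange 1 ((j : Int) + 1) 1).foldl (pvStepA s) (0, s.getD 0 0, s.getD 0 0)
    = ((PySem.List.pyRange 2 ((j : Int) + 1) 1).foldl (pvStepB s) (s.getD 1 0 - s.getD 0 0),
       s.getD (if j % 2 = 1 then j else j - 1) 0,
       s.getD (if j % 2 = 0 then j else j - 1) 0) := by
  induction j with
  | zero => omega
  | succ n ih =>
    rcases Nat.lt_or_ge n 1 with hn | hn
    · have hn0 : n = 0 := by omega
      subst hn0
      have hr : PySem.List.pyRange 1 (((1:Nat):Int)+1) 1 = [1] := by decide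
      have hr2 : PySem.List.pyRange 2 (((1:Nat):Int)+1) 1 = [] := by decide
      push_cast at hr hr2 ⊢
      rw [hr, hr2]
      simp [pvStepA, PySem.Int.mod, pysem]
      have := getD_mono s hs 0 1 (by omega) (by omega)
      simp only [List.getD] at this ⊢
      omega
    · have hlen : n < s.length := by omega
      have ihh := ih hn hlen
      have hsplit : PySem.List.pyRange 1 ((↑(n+1):Int)+1) 1
          = PySem.List.pyRange 1 ((n:Int)+1) 1 ++ [(n:Int)+1] := by
        push_cast
        exact PySem.List.pyRange_one_succ_right (a := 1) (b := (n:Int)+1) (by omega)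
      have hsplit2 : PySem.List.pyRange 2 ((↑(n+1):Int)+1) 1
          = PySem.List.pyRange 2 ((n:Int)+1) 1 ++ [(n:Int)+1] := by
        push_cast
        exact PySem.List.pyRange_one_succ_right (a := 2) (b := (n:Int)+1) (by omega)
      rw [hsplit, hsplit2, List.foldl_append, List.foldl_append, ihh]
      simp only [List.foldl]
      have h0 : ((n:Int)+1) ≠ 0 := by omega
      have hm := PySem.Int.mod_eq_emod_of_pos (a := (n:Int)+1) (b := 2) (by omega)
      have hget : PySem.List.pyGetD s ((n:Int)+1) 0 = s.getD (n+1) 0 := by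
        have h := PySem.List.pyGetD_natCast (xs := s) (n := n+1) (d := (0:Int))
        push_cast at h; exact h
      have hget2 : PySem.List.pyGetD s ((n:Int)+1-2) 0 = s.getD (n-1) 0 := by
        have h := PySem.List.pyGetD_natCast (xs := s) (n := n-1) (d := (0:Int))
        rw [show ((n:Int)+1-2) = ((n-1:Nat):Int) from by omega]
        exact h
      rcases Nat.mod_two_eq_zero_or_one n with hpar | hpar
      · -- n even, n+1 odd
        have hmod : PySem.Int.mod ((n:Int)+1) 2 = 1 := by rw [hm]; omega
        simp only [pvStepA, pvStepB, hmod, h0, beq_iff_eq, hget, hget2]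
        simp [pysem, hpar, Nat.succ_mod_two_eq_one_iff.mpr hpar]
      · have hmod : PySem.Int.mod ((n:Int)+1) 2 = 0 := by rw [hm]; omega
        simp only [pvStepA, pvStepB, hmod, h0, beq_iff_eq, hget, hget2]
        simp [pysem, hpar, Nat.succ_mod_two_eq_zero_iff.mpr hpar]

-- A's value is the running max of the stride-2 gaps, seeded with s[1]-s[0]
lemma pvMain (s : List Int) (hp : s.Pairwise (· ≤ ·)) :
    ((PySem.List.pyRange 0 (s.length : Int) 1).foldl (pvStepA s) (0, 0, 0)).1
    = if (s.length : Int) < 2 then 0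
      else (PySem.List.pyRange 2 (s.length : Int) 1).foldl (pvStepB s)
             (PySem.List.pyGetD s 1 0 - PySem.List.pyGetD s 0 0) := by
  by_cases h2 : s.length < 2
  · rcases s with _ | ⟨a, _ | ⟨b, t⟩⟩
    · decide
    · simp [pvStepA, show PySem.List.pyRange 0 1 1 = [0] from by decide]
    · simp at h2
  · have hlen : 2 ≤ s.length := by omega
    rw [if_neg (by exact_mod_cast h2)]
    have hcons : PySem.List.pyRange 0 (s.length : Int) 1
        = 0 :: PySem.List.pyRange 1 (s.length : Int) 1 :=
      PySem.List.pyRange_one_cons (by exact_mod_cast Nat.lt_of_lt_of_le (by omega : 0 < 2) hlen)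
    rw [hcons]
    simp only [List.foldl]
    have hstep0 : pvStepA s (0, 0, 0) 0 = (0, s.getD 0 0, s.getD 0 0) := by
      simp [pvStepA, pysem]
    rw [hstep0]
    have hj : (s.length : Int) = ((s.length - 1 : Nat) : Int) + 1 := by omega
    rw [hj, pvInv s hp (s.length - 1) (by omega) (by omega)]
    simp [pysem]

-- ---- B-side description: the seating, its rotation and the gap list, index by index ----

def pvEvens (s : List Int) : List Int := (List.range ((s.length+1)/2)).map (fun k => s.getD (2*k) 0)
def pvOdds (s : List Int) : List Int := (List.range (s.length/2)).map (fun k => s.getD (2*k+1) 0)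
def pvSeating (s : List Int) : List Int := pvEvens s ++ (pvOdds s).reverse
def pvRot (s : List Int) : List Int := (pvSeating s).drop 1 ++ (pvSeating s).take 1
def pvGaps (s : List Int) : List Int := ((pvSeating s).zip (pvRot s)).map (fun p => |p.2 - p.1|)
def pvSeat (s : List Int) (i : Nat) : Int :=
  if i < (s.length+1)/2 then s.getD (2*i) 0 else s.getD (2*(s.length-1-i)+1) 0
def pvBody (s : List Int) : Int :=
  let seating := (PySem.List.slice? s none none 2).getD [] ++
                 ((PySem.List.slice? s (some 1) none 2).getD []).reverse
  let rot := PySem.List.slice seating (some 1) none ++ PySem.List.slice seating none (some 1)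
  PySem.List.maxD ((seating.zip rot).map (fun p => |p.2 - p.1|)) (fun x => x) 0

-- step-2 slice of a list, written as an indexed map (used for both arr[::2] and arr[1::2])
lemma pvFilterMapRange (xs : List Int) (c : Nat) (f g : Nat → Nat) (hfg : ∀ k < c, f k = g k)
    (h : ∀ k < c, g k < xs.length) :
    List.filterMap (fun k => xs[f k]?) (List.range c) = (List.range c).map (fun k => xs.getD (g k) 0) := by
  induction c with
  | zero => simp
  | succ m ih =>
    rw [List.range_succ, List.filterMap_append, List.map_append,
        ih (fun k hk => hfg k (by omega)) (fun k hk => h k (by omega))]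
    have hm := h m (by omega)
    simp [List.getElem?_eq_getElem hm, hfg m (by omega)]

lemma pvEvens_eq (s : List Int) : (PySem.List.slice? s none none 2).getD [] = pvEvens s := by
  unfold PySem.List.slice? PySem.List.sliceIndices
  norm_num
  rw [show (if 0 < s.length then (((s.length:Int) + 2 - 1) / 2).toNat else 0) = (s.length + 1)/2
      from by split_ifs with h <;> omega]
  exact pvFilterMapRange s _ _ (fun k => 2*k)
    (fun k hk => by simp only []; omega) (fun k hk => by simp only []; omega)

lemma pvOdds_eq (s : List Int) : (PySem.List.slice? s (some 1) none 2).getD [] = pvOdds s := by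
  unfold PySem.List.slice? PySem.List.sliceIndices
  norm_num
  rw [show (if 1 < s.length then (((s.length:Int) - min 1 (s.length:Int) + 2 - 1) / 2).toNat else 0)
      = s.length/2 from by split_ifs with h <;> omega]
  exact pvFilterMapRange s _ _ (fun k => 2*k+1)
    (fun k hk => by simp only []; omega) (fun k hk => by simp only []; omega)

lemma pvBody_eq (s : List Int) : pvBody s = PySem.List.maxD (pvGaps s) (fun x => x) 0 := by
  unfold pvBody pvGaps pvRot pvSeating
  dsimp only
  rw [pvEvens_eq, pvOdds_eq, PySem.List.slice_from_one, PySem.List.slice_to]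
  · norm_num [← List.drop_one]
  · omega

lemma pvSeating_length (s : List Int) : (pvSeating s).length = s.length := by
  simp [pvSeating, pvEvens, pvOdds]; omega

lemma pvRot_length (s : List Int) : (pvRot s).length = s.length := by
  simp [pvRot, pvSeating_length]; omega

lemma pvGaps_length (s : List Int) : (pvGaps s).length = s.length := by
  simp [pvGaps, pvSeating_length, pvRot_length]

lemma pvSeating_getElem (s : List Int) (i : Nat) (hi : i < s.length) :
    (pvSeating s)[i]'(by rw [pvSeating_length]; exact hi) = pvSeat s i := by
  unfold pvSeating pvSeat
  by_cases h : i < (s.length+1)/2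
  · rw [List.getElem_append_left (by simpa [pvEvens] using h)]
    simp [pvEvens, h]
  · have hlen : (pvEvens s).length = (s.length+1)/2 := by simp [pvEvens]
    rw [List.getElem_append_right (by simpa [pvEvens] using h)]
    rw [List.getElem_reverse]
    simp only [pvOdds, List.getElem_map, List.getElem_range, List.length_map, List.length_range, hlen]
    rw [if_neg h]
    congr 2
    omega

lemma pvRot_getElem (s : List Int) (i : Nat) (hn : 1 ≤ s.length) (hi : i < s.length) :
    (pvRot s)[i]'(by rw [pvRot_length]; exact hi)
    = if i + 1 = s.length then pvSeat s 0 else pvSeat s (i+1) := by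
  obtain ⟨x, t, hst⟩ : ∃ x t, pvSeating s = x :: t := by
    rcases h : pvSeating s with _ | ⟨x, t⟩
    · exfalso; have hl := pvSeating_length s; rw [h] at hl; simp at hl; omega
    · exact ⟨x, t, rfl⟩
  have ht : t.length = s.length - 1 := by
    have hl := pvSeating_length s; rw [hst] at hl; simp at hl; omega
  unfold pvRot
  simp only [hst, List.drop_succ_cons, List.drop_zero, List.take_succ_cons, List.take_zero]
  by_cases h : i + 1 = s.length
  · have hit : i = t.length := by omega
    rw [List.getElem_concat_length hit, if_pos h]
    have h0 := (List.getElem_of_eq hst (by rw [pvSeating_length]; omega :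
      0 < (pvSeating s).length)).symm.trans (pvSeating_getElem s 0 (by omega))
    simpa using h0
  · rw [List.getElem_append_left (by omega)]
    rw [if_neg h]
    have h1 := (List.getElem_of_eq hst (by rw [pvSeating_length]; omega :
      i+1 < (pvSeating s).length)).symm.trans (pvSeating_getElem s (i+1) (by omega))
    simpa using h1

lemma pvGaps_getElem (s : List Int) (i : Nat) (hn : 1 ≤ s.length) (hi : i < s.length) :
    (pvGaps s)[i]'(by rw [pvGaps_length]; exact hi)
    = |(if i + 1 = s.length then pvSeat s 0 else pvSeat s (i+1)) - pvSeat s i| := by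
  unfold pvGaps
  rw [List.getElem_map, List.getElem_zip]
  rw [pvSeating_getElem s i hi, pvRot_getElem s i hn hi]

-- the running max over pvStepB: the bound characterisation
lemma pvStepB_foldl_le_iff (s : List Int) (L : List Int) (a c : Int) :
    L.foldl (pvStepB s) a ≤ c ↔ a ≤ c ∧
      ∀ i ∈ L, PySem.List.pyGetD s i 0 - PySem.List.pyGetD s (i-2) 0 ≤ c := by
  induction L generalizing a with
  | nil => simp
  | cons h t ih => rw [List.foldl_cons, ih]; simp [pvStepB]; tauto

-- every stride-2 gap is at most A's running max
lemma pvStride_le (s : List Int) (seed : Int) (k : Nat) (h2 : 2 ≤ k) (hk : k < s.length) :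
    s.getD k 0 - s.getD (k-2) 0
      ≤ (PySem.List.pyRange 2 (s.length:Int) 1).foldl (pvStepB s) seed := by
  have hF := (pvStepB_foldl_le_iff s (PySem.List.pyRange 2 (s.length:Int) 1) seed
    ((PySem.List.pyRange 2 (s.length:Int) 1).foldl (pvStepB s) seed)).mp (le_refl _)
  have hmem : ((k:Nat):Int) ∈ PySem.List.pyRange 2 (s.length:Int) 1 := by
    rw [PySem.List.mem_pyRange_one]; omega
  have h := hF.2 _ hmem
  rw [PySem.List.pyGetD_natCast,
      show ((k:Int) - 2) = ((k-2:Nat):Int) from by omega, PySem.List.pyGetD_natCast] at h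
  exact h

-- and the running max is bounded by any bound on the seed and all stride-2 gaps
lemma pvLe_stride (s : List Int) (seed c : Int) (hseed : seed ≤ c)
    (helts : ∀ k : Nat, 2 ≤ k → k < s.length → s.getD k 0 - s.getD (k-2) 0 ≤ c) :
    (PySem.List.pyRange 2 (s.length:Int) 1).foldl (pvStepB s) seed ≤ c := by
  refine (pvStepB_foldl_le_iff _ _ _ _).mpr ⟨hseed, ?_⟩
  intro i hi
  rw [PySem.List.mem_pyRange_one] at hi
  rw [show i = ((i.toNat:Nat):Int) from by omega, PySem.List.pyGetD_natCast,
      show ((i.toNat:Int) - 2) = ((i.toNat - 2 : Nat):Int) from by omega,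
      PySem.List.pyGetD_natCast]
  exact helts i.toNat (by omega) (by omega)

-- the gap a sorted list shows between two of its positions, with the abs removed
lemma pvAbs_gap (s : List Int) (hp : s.Pairwise (· ≤ ·)) (p q : Nat) (hpq : p ≤ q)
    (hq : q < s.length) : |s.getD q 0 - s.getD p 0| = s.getD q 0 - s.getD p 0 :=
  abs_of_nonneg (sub_nonneg.mpr (getD_mono s hp p q hpq hq))

-- the main B-side identity: the stride-2 running max equals the circular measure of the seating
lemma pvMainB (s : List Int) (hp : s.Pairwise (· ≤ ·)) :
    (if (s.length : Int) < 2 then 0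
      else (PySem.List.pyRange 2 (s.length : Int) 1).foldl (pvStepB s)
             (PySem.List.pyGetD s 1 0 - PySem.List.pyGetD s 0 0))
    = pvBody s := by
  rw [pvBody_eq]
  by_cases h2 : s.length < 2
  · rw [if_pos (by exact_mod_cast h2)]
    rcases s with _ | ⟨a, _ | ⟨b, t⟩⟩
    · rfl
    · simp [pvGaps, pvRot, pvSeating, pvEvens, pvOdds, PySem.List.maxD, PySem.List.max?]
    · simp at h2
  · have hn2 : 2 ≤ s.length := by omega
    rw [if_neg (by exact_mod_cast h2)]
    have hseed : PySem.List.pyGetD s 1 0 - PySem.List.pyGetD s 0 0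
        = s.getD 1 0 - s.getD 0 0 := by
      have a := PySem.List.pyGetD_natCast (xs:=s) (n:=1) (d:=(0:Int))
      have b := PySem.List.pyGetD_natCast (xs:=s) (n:=0) (d:=(0:Int))
      push_cast at a b; rw [a, b]
    obtain ⟨m, hm⟩ : ∃ m, PySem.List.max? (pvGaps s) (fun x => x) = some m := by
      cases hmx : PySem.List.max? (pvGaps s) (fun x => x) with
      | none =>
        exfalso
        have := (PySem.List.max?_eq_none_iff (pvGaps s) (fun x => x)).mp hmx
        have hl := pvGaps_length s; rw [this] at hl; simp at hl; omega
      | some m => exact ⟨m, rfl⟩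
    have hmaxD : PySem.List.maxD (pvGaps s) (fun x => x) 0 = m := by
      unfold PySem.List.maxD; rw [hm]; rfl
    rw [hmaxD, hseed]
    have hmax : ∀ y ∈ pvGaps s, y ≤ m := by
      intro y hy; simpa using PySem.List.max?_isMax hm y hy
    have hgapmem : ∀ i : Nat, (hi : i < s.length) →
        |(if i + 1 = s.length then pvSeat s 0 else pvSeat s (i+1)) - pvSeat s i| ∈ pvGaps s := by
      intro i hi
      rw [← pvGaps_getElem s i (by omega) hi]
      exact List.getElem_mem _
    -- the wrap-around gap of the seating is exactly the seed s[1]-s[0]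
    have hwrap : |(if (s.length - 1) + 1 = s.length then pvSeat s 0
                    else pvSeat s (s.length - 1 + 1)) - pvSeat s (s.length - 1)|
        = s.getD 1 0 - s.getD 0 0 := by
      rw [if_pos (by omega)]
      unfold pvSeat
      rw [if_pos (by omega : 0 < (s.length+1)/2), if_neg (by omega : ¬ s.length - 1 < (s.length+1)/2),
          show 2*(s.length-1-(s.length-1))+1 = 1 from by omega, show 2*0 = 0 from rfl]
      rw [abs_sub_comm]
      exact pvAbs_gap s hp 0 1 (by omega) (by omega)
    apply le_antisymm
    · -- A's running max ≤ m
      apply pvLe_stride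
      · rw [← hwrap]; exact hmax _ (hgapmem (s.length - 1) (by omega))
      · intro k hk2 hkn
        rcases Nat.mod_two_eq_zero_or_one k with hpar | hpar
        · -- k even: the gap sits inside the even run of the seating, at position k/2 - 1
          have hv := hgapmem (k/2 - 1) (by omega)
          rw [if_neg (by omega), ] at hv
          unfold pvSeat at hv
          rw [if_pos (by omega : k/2 - 1 + 1 < (s.length+1)/2),
              if_pos (by omega : k/2 - 1 < (s.length+1)/2),
              show 2*(k/2 - 1 + 1) = k from by omega,
              show 2*(k/2 - 1) = k - 2 from by omega,
              pvAbs_gap s hp (k-2) k (by omega) hkn] at hv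
          exact hmax _ hv
        · -- k odd: the gap sits inside the odd run, at position n - 1 - (k-1)/2
          have hv := hgapmem (s.length - 1 - (k-1)/2) (by omega)
          rw [if_neg (by omega)] at hv
          unfold pvSeat at hv
          rw [if_neg (by omega : ¬ s.length - 1 - (k-1)/2 + 1 < (s.length+1)/2),
              if_neg (by omega : ¬ s.length - 1 - (k-1)/2 < (s.length+1)/2),
              show 2*(s.length - 1 - (s.length - 1 - (k-1)/2 + 1))+1 = k - 2 from by omega,
              show 2*(s.length - 1 - (s.length - 1 - (k-1)/2))+1 = k from by omega,
              abs_sub_comm, pvAbs_gap s hp (k-2) k (by omega) hkn] at hv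
          exact hmax _ hv
    · -- m ≤ A's running max
      obtain ⟨i, hilt, hieq⟩ := List.mem_iff_getElem.mp (PySem.List.max?_mem hm)
      have hin : i < s.length := by rw [pvGaps_length] at hilt; exact hilt
      rw [← hieq, pvGaps_getElem s i (by omega) hin]
      by_cases hiw : i + 1 = s.length
      · -- the wrap-around gap equals the seed
        have hieq2 : i = s.length - 1 := by omega
        rw [hieq2]
        rw [show (if s.length - 1 + 1 = s.length then pvSeat s 0
              else pvSeat s (s.length - 1 + 1)) - pvSeat s (s.length - 1)
            = (if (s.length - 1) + 1 = s.length then pvSeat s 0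
              else pvSeat s (s.length - 1 + 1)) - pvSeat s (s.length - 1) from rfl, hwrap]
        exact ((pvStepB_foldl_le_iff s _ _ _).mp (le_refl _)).1
      · rw [if_neg hiw]
        have hF := (pvStepB_foldl_le_iff s (PySem.List.pyRange 2 (s.length:Int) 1)
          (s.getD 1 0 - s.getD 0 0) _).mp (le_refl _)
        by_cases he : i + 1 < (s.length+1)/2
        · -- both ends in the even run: a stride-2 gap at index 2i+2
          unfold pvSeat
          rw [if_pos he, if_pos (by omega),
              show 2*(i+1) = (2*i+2) from by omega,
              pvAbs_gap s hp (2*i) (2*i+2) (by omega) (by omega),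
              show 2*i = (2*i+2) - 2 from by omega]
          exact pvStride_le s _ (2*i+2) (by omega) (by omega)
        · by_cases he2 : i < (s.length+1)/2
          · -- the junction between the two runs: |s[n-1] - s[n-2]|
            have hj : i + 1 = (s.length+1)/2 := by omega
            unfold pvSeat
            rw [if_neg he, if_pos he2]
            have hval : |s.getD (2*(s.length-1-(i+1))+1) 0 - s.getD (2*i) 0|
                = s.getD (s.length - 1) 0 - s.getD (s.length - 2) 0 := by
              rcases Nat.mod_two_eq_zero_or_one s.length with hnp | hnp
              · rw [show 2*(s.length-1-(i+1))+1 = s.length - 1 from by omega,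
                    show 2*i = s.length - 2 from by omega,
                    pvAbs_gap s hp (s.length-2) (s.length-1) (by omega) (by omega)]
              · rw [show 2*(s.length-1-(i+1))+1 = s.length - 2 from by omega,
                    show 2*i = s.length - 1 from by omega, abs_sub_comm,
                    pvAbs_gap s hp (s.length-2) (s.length-1) (by omega) (by omega)]
            rw [hval]
            rcases Nat.lt_or_ge s.length 3 with h3 | h3
            · -- n = 2: the junction gap is the seed itself
              rw [show s.length - 1 = 1 from by omega, show s.length - 2 = 0 from by omega]
              exact hF.1
            · -- n ≥ 3: dominated by the stride-2 gap at index n-1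
              calc s.getD (s.length - 1) 0 - s.getD (s.length - 2) 0
                  ≤ s.getD (s.length - 1) 0 - s.getD (s.length - 1 - 2) 0 := by
                    have := getD_mono s hp (s.length - 1 - 2) (s.length - 2) (by omega) (by omega)
                    omega
                _ ≤ _ := pvStride_le s _ (s.length - 1) (by omega) (by omega)
          · -- both ends in the odd run: a stride-2 gap at index 2(n-1-i)+1
            unfold pvSeat
            rw [if_neg he, if_neg he2, abs_sub_comm,
                show 2*(s.length-1-(i+1))+1 = (2*(s.length-1-i)+1) - 2 from by omega,
                pvAbs_gap s hp ((2*(s.length-1-i)+1) - 2) (2*(s.length-1-i)+1) (by omega) (by omega)]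
            exact pvStride_le s _ (2*(s.length-1-i)+1) (by omega) (by omega)

-- ===== VERDICT (by name: the statement is the Claim_ definition above) =====
theorem minOverallAwkwardness_spec : Claim_equal_minOverallAwkwardness := by
  intro arr _
  unfold Spec_minOverallAwkwardness minOverallAwkwardness minOverallAwkwardness_alt
  have hp := PySem.List.sorted_pairwise (xs := arr) (key := fun x => x)
  rw [pvMain _ (by simpa using hp)]
  exact pvMainB _ (by simpa using hp)
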